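-- pv_equiv track=rewrite | github.com/hyjoo1226/Algorithm | 백준/IM추천문제/2578. 빙고.py | bingo_check
-- ===== SOURCE A (Python) =====
-- def bingo_check(arr):   #빙고면 true, 아니면 false 리턴
--     bingo_count = 0 #빙고카운트
--     for i in range(5):
--         width_count = 0
--         length_count = 0
--         for j in range(5):  #가로체크
--             if arr[i][j] == 0:
--                 width_count += 1
--                 if width_count == 5:
--                     bingo_count += 1
--             else:
--                 width_count = 0
--
--             if arr[j][i] == 0:  #세로체크
--                 length_count += 1
--                 if length_count == 5:
--                     bingo_count += 1
--             else:
--                 length_count = 0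
--     #대각체크
--     if arr[0][0] == 0 and arr[1][1] == 0 and arr[2][2] == 0 and arr[3][3] == 0 and arr[4][4] == 0:
--         bingo_count += 1
--     if arr[0][4] == 0 and arr[1][3] == 0 and arr[2][2] == 0 and arr[3][1] == 0 and arr[4][0] == 0:
--         bingo_count += 1
--
--     if bingo_count >= 3:
--         return True
--     else:
--         return False
-- ===== SOURCE B (Python) =====
-- def bingo_check(arr):
--     # Encode the zero cells as a 25-bit mask; a bingo line is a subset test
--     # (mask & line == line) against 12 precomputed line masks.
--     mask = 0
--     for i in range(5):
--         for j in range(5):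
--             mask |= (arr[i][j] == 0) << (5 * i + j)
--     LINES = [31 << (5 * i) for i in range(5)] \
--           + [1082401 << i for i in range(5)] \
--           + [17043521, 1118480]
--     count = 0
--     for L in LINES:
--         if mask & L == L:
--             count += 1
--     return count >= 3
-- ===== Notes on version B (the rewrite author's own statement) =====
-- stated objective: alternative
-- what changed: Replaced A's interleaved running-counter state machine by a bitmask encoding: the zero cells become a 25-bit mask built in one pass, and each of the 12 precomputed line masks is tested for subset inclusion with a bitwise AND; the number of included line masks is compared with 3.
import Mathlib
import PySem

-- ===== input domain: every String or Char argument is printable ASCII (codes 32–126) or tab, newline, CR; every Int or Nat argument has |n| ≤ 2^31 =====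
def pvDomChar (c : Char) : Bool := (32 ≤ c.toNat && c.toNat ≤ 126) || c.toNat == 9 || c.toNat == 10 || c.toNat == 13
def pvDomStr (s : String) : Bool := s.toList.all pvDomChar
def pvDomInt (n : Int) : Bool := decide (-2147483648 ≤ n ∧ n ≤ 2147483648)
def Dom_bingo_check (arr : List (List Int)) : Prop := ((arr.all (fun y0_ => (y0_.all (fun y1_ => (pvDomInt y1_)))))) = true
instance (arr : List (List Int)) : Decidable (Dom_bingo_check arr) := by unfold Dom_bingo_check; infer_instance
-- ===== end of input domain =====

-- B replaces A's interleaved running-counter state machine by a 25-bit bitmask of the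
-- zero cells and bitwise subset tests against 12 precomputed line masks (objective: alternative).

-- shared index helper: arr[i][j]; Pre_ guarantees both indices in range, so the
-- defaults are never reached on admitted inputs (Python raises IndexError outside Pre_).
def pvAt (arr : List (List Int)) (i j : Int) : Int :=
  PySem.List.pyGetD (PySem.List.pyGetD arr i []) j 1

-- ===== PORT A =====
-- one step of A's inner j-loop: f j = arr[i][j] (가로체크), g j = arr[j][i] (세로체크);
-- state (width_count, length_count, bingo_count), branches in A's order.
def pvGStep (f g : Int → Int) (s : Int × Int × Int) (j : Int) : Int × Int × Int :=
  let w := s.1; let l := s.2.1; let b := s.2.2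
  let wb : Int × Int :=
    if f j = 0 then (w + 1, if w + 1 = 5 then b + 1 else b) else (0, b)
  let lb : Int × Int :=
    if g j = 0 then (l + 1, if l + 1 = 5 then wb.2 + 1 else wb.2) else (0, wb.2)
  (wb.1, lb.1, lb.2)

def bingo_check (arr : List (List Int)) : Bool :=
  let bingo : Int := (PySem.List.pyRange 0 5 1).foldl
    (fun bc i => ((PySem.List.pyRange 0 5 1).foldl
      (pvGStep (pvAt arr i) (fun j => pvAt arr j i)) (0, 0, bc)).2.2) 0
  let bingo := if pvAt arr 0 0 = 0 ∧ pvAt arr 1 1 = 0 ∧ pvAt arr 2 2 = 0 ∧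
      pvAt arr 3 3 = 0 ∧ pvAt arr 4 4 = 0 then bingo + 1 else bingo
  let bingo := if pvAt arr 0 4 = 0 ∧ pvAt arr 1 3 = 0 ∧ pvAt arr 2 2 = 0 ∧
      pvAt arr 3 1 = 0 ∧ pvAt arr 4 0 = 0 then bingo + 1 else bingo
  decide (bingo ≥ 3)

-- ===== PORT B =====
-- mask |= (arr[i][j] == 0) << (5*i+j); all mask values are nonnegative Python ints,
-- represented as Nat so the bitwise ops are exact; the shift amount 5*i+j is a
-- nonnegative literal, so .toNat is exact.
def pvMask (arr : List (List Int)) : Nat :=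
  (PySem.List.pyRange 0 5 1).foldl (fun m i =>
    (PySem.List.pyRange 0 5 1).foldl (fun m j =>
      m ||| ((if pvAt arr i j = 0 then (1 : Nat) else 0) <<< (5 * i + j).toNat)) m) 0

-- LINES = [31 << (5*i) for i in range(5)] + [1082401 << i for i in range(5)] + [17043521, 1118480]
def pvLines : List Nat :=
  ((PySem.List.pyRange 0 5 1).map (fun i => (31 : Nat) <<< (5 * i).toNat))
  ++ ((PySem.List.pyRange 0 5 1).map (fun i => (1082401 : Nat) <<< i.toNat))
  ++ [17043521, 1118480]

def bingo_check_alt (arr : List (List Int)) : Bool :=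
  let mask := pvMask arr
  let count : Int := pvLines.foldl (fun c L => if mask &&& L = L then c + 1 else c) 0
  decide (count ≥ 3)

-- ===== PRECONDITION & SPEC =====
-- Pre_: exactly the boards A indexes without IndexError: at least 5 rows, and each of
-- the first 5 rows has at least 5 entries.
def Pre_bingo_check (arr : List (List Int)) : Prop :=
  5 ≤ arr.length ∧ ∀ r ∈ arr.take 5, 5 ≤ r.length
instance (arr : List (List Int)) : Decidable (Pre_bingo_check arr) := by
  unfold Pre_bingo_check; infer_instance

def pvWitness_bingo_check : List (List Int) :=
  [[0,0,0,0,0],[1,1,1,1,1],[0,0,0,0,0],[1,1,1,1,1],[0,0,0,0,0]]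

def Spec_bingo_check (arr : List (List Int)) (out : Bool) : Prop := out = bingo_check_alt arr
instance (arr : List (List Int)) (out : Bool) : Decidable (Spec_bingo_check arr out) := by unfold Spec_bingo_check; infer_instance

-- ===== CLAIM (what is proved, stated in full; the proofs are below) =====
def Claim_equal_bingo_check : Prop := ∀ (arr : List (List Int)), Dom_bingo_check arr → Pre_bingo_check arr → Spec_bingo_check arr (bingo_check arr)

-- ===== LEMMAS AND PROOFS =====

lemma pvRange5 : PySem.List.pyRange 0 5 1 = [0, 1, 2, 3, 4] := by decide

-- ---- A side: the running counters decompose into per-line indicators ----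

-- the final width/length counter after processing js
def pvRW (f : Int → Int) (w : Int) : List Int → Int
  | [] => w
  | j :: js => pvRW f (if f j = 0 then w + 1 else 0) js

-- how much the counter over f adds to bingo_count while processing js
def pvRI (f : Int → Int) (w : Int) : List Int → Int
  | [] => 0
  | j :: js => (if f j = 0 ∧ w + 1 = 5 then 1 else 0) + pvRI f (if f j = 0 then w + 1 else 0) js

-- the two counters in A's inner loop are independent: the combined fold splits
lemma pvSplit (f g : Int → Int) : ∀ (js : List Int) (w l b : Int),
    (js.foldl (pvGStep f g) (w, l, b)) =
      (pvRW f w js, pvRW g l js, b + pvRI f w js + pvRI g l js) := by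
  intro js
  induction js with
  | nil => intro w l b; simp [pvRW, pvRI]
  | cons j js ih =>
      intro w l b
      simp only [List.foldl, pvRW, pvRI, pvGStep, ih]
      split_ifs <;> simp_all <;> ring

-- over five cells the counter's contribution is the all-zero indicator
lemma pvRI5 (f : Int → Int) :
    pvRI f 0 [0, 1, 2, 3, 4] =
      (if f 0 = 0 ∧ f 1 = 0 ∧ f 2 = 0 ∧ f 3 = 0 ∧ f 4 = 0 then 1 else 0) := by
  by_cases h0 : f 0 = 0 <;> by_cases h1 : f 1 = 0 <;> by_cases h2 : f 2 = 0 <;>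
    by_cases h3 : f 3 = 0 <;> by_cases h4 : f 4 = 0 <;>
    norm_num [pvRI, h0, h1, h2, h3, h4]

-- A's inner j-loop over one i contributes exactly the row- and column-full indicators
lemma pvBlock (f g : Int → Int) (bc : Int) :
    (List.foldl (pvGStep f g) (0, 0, bc) [0, 1, 2, 3, 4]).2.2 =
      bc + (if f 0 = 0 ∧ f 1 = 0 ∧ f 2 = 0 ∧ f 3 = 0 ∧ f 4 = 0 then 1 else 0)
         + (if g 0 = 0 ∧ g 1 = 0 ∧ g 2 = 0 ∧ g 3 = 0 ∧ g 4 = 0 then 1 else 0) := by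
  rw [pvSplit, pvRI5, pvRI5]

-- conditional increment as an additive 0/1 indicator
lemma pvIteAdd (c : Prop) [Decidable c] (x : Int) :
    (if c then x + 1 else x) = (if c then 1 else 0) + x := by
  split_ifs <;> ring

-- ---- B side: characterize the subset test for each of the 12 line masks ----

-- push a conditional 0/1 through a shift
lemma pvIteShift (c : Prop) [Decidable c] (k : Nat) :
    ((if c then (1 : Nat) else 0) <<< k) = if c then 1 <<< k else 0 := by
  split_ifs <;> simp

-- push a conditional through a bitwise and
lemma pvIteLand (c : Prop) [Decidable c] (x y L : Nat) :
    ((if c then x else y) &&& L) = if c then x &&& L else y &&& L := by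
  split_ifs <;> rfl

-- the mask's AND with a line mask keeps exactly that line's conditional bits
lemma pvMaskLand (arr : List (List Int)) (L : Nat) :
    pvMask arr &&& L =
      0 &&& L |||
      (if pvAt arr 0 0 = 0 then 1 &&& L else 0) |||
      (if pvAt arr 0 1 = 0 then 2 &&& L else 0) |||
      (if pvAt arr 0 2 = 0 then 4 &&& L else 0) |||
      (if pvAt arr 0 3 = 0 then 8 &&& L else 0) |||
      (if pvAt arr 0 4 = 0 then 16 &&& L else 0) |||
      (if pvAt arr 1 0 = 0 then 32 &&& L else 0) |||
      (if pvAt arr 1 1 = 0 then 64 &&& L else 0) |||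
      (if pvAt arr 1 2 = 0 then 128 &&& L else 0) |||
      (if pvAt arr 1 3 = 0 then 256 &&& L else 0) |||
      (if pvAt arr 1 4 = 0 then 512 &&& L else 0) |||
      (if pvAt arr 2 0 = 0 then 1024 &&& L else 0) |||
      (if pvAt arr 2 1 = 0 then 2048 &&& L else 0) |||
      (if pvAt arr 2 2 = 0 then 4096 &&& L else 0) |||
      (if pvAt arr 2 3 = 0 then 8192 &&& L else 0) |||
      (if pvAt arr 2 4 = 0 then 16384 &&& L else 0) |||
      (if pvAt arr 3 0 = 0 then 32768 &&& L else 0) |||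
      (if pvAt arr 3 1 = 0 then 65536 &&& L else 0) |||
      (if pvAt arr 3 2 = 0 then 131072 &&& L else 0) |||
      (if pvAt arr 3 3 = 0 then 262144 &&& L else 0) |||
      (if pvAt arr 3 4 = 0 then 524288 &&& L else 0) |||
      (if pvAt arr 4 0 = 0 then 1048576 &&& L else 0) |||
      (if pvAt arr 4 1 = 0 then 2097152 &&& L else 0) |||
      (if pvAt arr 4 2 = 0 then 4194304 &&& L else 0) |||
      (if pvAt arr 4 3 = 0 then 8388608 &&& L else 0) |||
      (if pvAt arr 4 4 = 0 then 16777216 &&& L else 0) := by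
  simp only [pvMask, pvRange5, List.foldl_cons, List.foldl_nil, pvIteShift]
  simp only [Int.reduceMul, Int.reduceAdd, Int.reduceToNat, Nat.reduceShiftLeft]
  norm_num [Nat.and_or_distrib_right, pvIteLand]

lemma pvLinesEval : pvLines =
    [31, 992, 31744, 1015808, 32505856, 1082401, 2164802, 4329604, 8659208, 17318416,
     17043521, 1118480] := by decide

lemma pvRow0 (arr : List (List Int)) :
    (pvMask arr &&& 31 = 31) ↔ (pvAt arr 0 0 = 0 ∧ pvAt arr 0 1 = 0 ∧ pvAt arr 0 2 = 0 ∧ pvAt arr 0 3 = 0 ∧ pvAt arr 0 4 = 0) := by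
  rw [pvMaskLand]
  norm_num
  by_cases h0 : pvAt arr 0 0 = 0 <;>
    by_cases h1 : pvAt arr 0 1 = 0 <;>
    by_cases h2 : pvAt arr 0 2 = 0 <;>
    by_cases h3 : pvAt arr 0 3 = 0 <;>
    by_cases h4 : pvAt arr 0 4 = 0 <;>
    simp [h0, h1, h2, h3, h4]

lemma pvRow1 (arr : List (List Int)) :
    (pvMask arr &&& 992 = 992) ↔ (pvAt arr 1 0 = 0 ∧ pvAt arr 1 1 = 0 ∧ pvAt arr 1 2 = 0 ∧ pvAt arr 1 3 = 0 ∧ pvAt arr 1 4 = 0) := by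
  rw [pvMaskLand]
  norm_num
  by_cases h0 : pvAt arr 1 0 = 0 <;>
    by_cases h1 : pvAt arr 1 1 = 0 <;>
    by_cases h2 : pvAt arr 1 2 = 0 <;>
    by_cases h3 : pvAt arr 1 3 = 0 <;>
    by_cases h4 : pvAt arr 1 4 = 0 <;>
    simp [h0, h1, h2, h3, h4]

lemma pvRow2 (arr : List (List Int)) :
    (pvMask arr &&& 31744 = 31744) ↔ (pvAt arr 2 0 = 0 ∧ pvAt arr 2 1 = 0 ∧ pvAt arr 2 2 = 0 ∧ pvAt arr 2 3 = 0 ∧ pvAt arr 2 4 = 0) := by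
  rw [pvMaskLand]
  norm_num
  by_cases h0 : pvAt arr 2 0 = 0 <;>
    by_cases h1 : pvAt arr 2 1 = 0 <;>
    by_cases h2 : pvAt arr 2 2 = 0 <;>
    by_cases h3 : pvAt arr 2 3 = 0 <;>
    by_cases h4 : pvAt arr 2 4 = 0 <;>
    simp [h0, h1, h2, h3, h4]

lemma pvRow3 (arr : List (List Int)) :
    (pvMask arr &&& 1015808 = 1015808) ↔ (pvAt arr 3 0 = 0 ∧ pvAt arr 3 1 = 0 ∧ pvAt arr 3 2 = 0 ∧ pvAt arr 3 3 = 0 ∧ pvAt arr 3 4 = 0) := by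
  rw [pvMaskLand]
  norm_num
  by_cases h0 : pvAt arr 3 0 = 0 <;>
    by_cases h1 : pvAt arr 3 1 = 0 <;>
    by_cases h2 : pvAt arr 3 2 = 0 <;>
    by_cases h3 : pvAt arr 3 3 = 0 <;>
    by_cases h4 : pvAt arr 3 4 = 0 <;>
    simp [h0, h1, h2, h3, h4]

lemma pvRow4 (arr : List (List Int)) :
    (pvMask arr &&& 32505856 = 32505856) ↔ (pvAt arr 4 0 = 0 ∧ pvAt arr 4 1 = 0 ∧ pvAt arr 4 2 = 0 ∧ pvAt arr 4 3 = 0 ∧ pvAt arr 4 4 = 0) := by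
  rw [pvMaskLand]
  norm_num
  by_cases h0 : pvAt arr 4 0 = 0 <;>
    by_cases h1 : pvAt arr 4 1 = 0 <;>
    by_cases h2 : pvAt arr 4 2 = 0 <;>
    by_cases h3 : pvAt arr 4 3 = 0 <;>
    by_cases h4 : pvAt arr 4 4 = 0 <;>
    simp [h0, h1, h2, h3, h4]

lemma pvCol0 (arr : List (List Int)) :
    (pvMask arr &&& 1082401 = 1082401) ↔ (pvAt arr 0 0 = 0 ∧ pvAt arr 1 0 = 0 ∧ pvAt arr 2 0 = 0 ∧ pvAt arr 3 0 = 0 ∧ pvAt arr 4 0 = 0) := by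
  rw [pvMaskLand]
  norm_num
  by_cases h0 : pvAt arr 0 0 = 0 <;>
    by_cases h1 : pvAt arr 1 0 = 0 <;>
    by_cases h2 : pvAt arr 2 0 = 0 <;>
    by_cases h3 : pvAt arr 3 0 = 0 <;>
    by_cases h4 : pvAt arr 4 0 = 0 <;>
    simp [h0, h1, h2, h3, h4]

lemma pvCol1 (arr : List (List Int)) :
    (pvMask arr &&& 2164802 = 2164802) ↔ (pvAt arr 0 1 = 0 ∧ pvAt arr 1 1 = 0 ∧ pvAt arr 2 1 = 0 ∧ pvAt arr 3 1 = 0 ∧ pvAt arr 4 1 = 0) := by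
  rw [pvMaskLand]
  norm_num
  by_cases h0 : pvAt arr 0 1 = 0 <;>
    by_cases h1 : pvAt arr 1 1 = 0 <;>
    by_cases h2 : pvAt arr 2 1 = 0 <;>
    by_cases h3 : pvAt arr 3 1 = 0 <;>
    by_cases h4 : pvAt arr 4 1 = 0 <;>
    simp [h0, h1, h2, h3, h4]

lemma pvCol2 (arr : List (List Int)) :
    (pvMask arr &&& 4329604 = 4329604) ↔ (pvAt arr 0 2 = 0 ∧ pvAt arr 1 2 = 0 ∧ pvAt arr 2 2 = 0 ∧ pvAt arr 3 2 = 0 ∧ pvAt arr 4 2 = 0) := by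
  rw [pvMaskLand]
  norm_num
  by_cases h0 : pvAt arr 0 2 = 0 <;>
    by_cases h1 : pvAt arr 1 2 = 0 <;>
    by_cases h2 : pvAt arr 2 2 = 0 <;>
    by_cases h3 : pvAt arr 3 2 = 0 <;>
    by_cases h4 : pvAt arr 4 2 = 0 <;>
    simp [h0, h1, h2, h3, h4]

lemma pvCol3 (arr : List (List Int)) :
    (pvMask arr &&& 8659208 = 8659208) ↔ (pvAt arr 0 3 = 0 ∧ pvAt arr 1 3 = 0 ∧ pvAt arr 2 3 = 0 ∧ pvAt arr 3 3 = 0 ∧ pvAt arr 4 3 = 0) := by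
  rw [pvMaskLand]
  norm_num
  by_cases h0 : pvAt arr 0 3 = 0 <;>
    by_cases h1 : pvAt arr 1 3 = 0 <;>
    by_cases h2 : pvAt arr 2 3 = 0 <;>
    by_cases h3 : pvAt arr 3 3 = 0 <;>
    by_cases h4 : pvAt arr 4 3 = 0 <;>
    simp [h0, h1, h2, h3, h4]

lemma pvCol4 (arr : List (List Int)) :
    (pvMask arr &&& 17318416 = 17318416) ↔ (pvAt arr 0 4 = 0 ∧ pvAt arr 1 4 = 0 ∧ pvAt arr 2 4 = 0 ∧ pvAt arr 3 4 = 0 ∧ pvAt arr 4 4 = 0) := by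
  rw [pvMaskLand]
  norm_num
  by_cases h0 : pvAt arr 0 4 = 0 <;>
    by_cases h1 : pvAt arr 1 4 = 0 <;>
    by_cases h2 : pvAt arr 2 4 = 0 <;>
    by_cases h3 : pvAt arr 3 4 = 0 <;>
    by_cases h4 : pvAt arr 4 4 = 0 <;>
    simp [h0, h1, h2, h3, h4]

lemma pvDiag (arr : List (List Int)) :
    (pvMask arr &&& 17043521 = 17043521) ↔ (pvAt arr 0 0 = 0 ∧ pvAt arr 1 1 = 0 ∧ pvAt arr 2 2 = 0 ∧ pvAt arr 3 3 = 0 ∧ pvAt arr 4 4 = 0) := by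
  rw [pvMaskLand]
  norm_num
  by_cases h0 : pvAt arr 0 0 = 0 <;>
    by_cases h1 : pvAt arr 1 1 = 0 <;>
    by_cases h2 : pvAt arr 2 2 = 0 <;>
    by_cases h3 : pvAt arr 3 3 = 0 <;>
    by_cases h4 : pvAt arr 4 4 = 0 <;>
    simp [h0, h1, h2, h3, h4]

lemma pvAnti (arr : List (List Int)) :
    (pvMask arr &&& 1118480 = 1118480) ↔ (pvAt arr 0 4 = 0 ∧ pvAt arr 1 3 = 0 ∧ pvAt arr 2 2 = 0 ∧ pvAt arr 3 1 = 0 ∧ pvAt arr 4 0 = 0) := by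
  rw [pvMaskLand]
  norm_num
  by_cases h0 : pvAt arr 0 4 = 0 <;>
    by_cases h1 : pvAt arr 1 3 = 0 <;>
    by_cases h2 : pvAt arr 2 2 = 0 <;>
    by_cases h3 : pvAt arr 3 1 = 0 <;>
    by_cases h4 : pvAt arr 4 0 = 0 <;>
    simp [h0, h1, h2, h3, h4]

-- A's inner j-loop over row/column i contributes exactly the two full-line indicators
lemma pvStep (arr : List (List Int)) (bc i : Int) :
    (List.foldl (pvGStep (pvAt arr i) (fun j => pvAt arr j i)) (0, 0, bc) (PySem.List.pyRange 0 5 1)).2.2 =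
      bc + (if pvAt arr i 0 = 0 ∧ pvAt arr i 1 = 0 ∧ pvAt arr i 2 = 0 ∧ pvAt arr i 3 = 0 ∧ pvAt arr i 4 = 0 then 1 else 0)
         + (if pvAt arr 0 i = 0 ∧ pvAt arr 1 i = 0 ∧ pvAt arr 2 i = 0 ∧ pvAt arr 3 i = 0 ∧ pvAt arr 4 i = 0 then 1 else 0) := by
  rw [pvRange5]; exact pvBlock _ _ _

-- ===== VERDICT (by name: the statement is the Claim_ definition above) =====
set_option maxHeartbeats 1000000 in
theorem bingo_check_spec : Claim_equal_bingo_check := by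
  intro arr _ _
  unfold Spec_bingo_check bingo_check bingo_check_alt
  simp only [pvStep]
  simp only [pvRange5, List.foldl_cons, List.foldl_nil, pvLinesEval, pvIteAdd]
  simp only [pvRow0, pvRow1, pvRow2, pvRow3, pvRow4, pvCol0, pvCol1, pvCol2, pvCol3, pvCol4,
    pvDiag, pvAnti]
  norm_num
  ring_nf
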